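-- pv_equiv track=rewrite | github.com/wqrewffe/back | app.py | summarize_response
-- ===== SOURCE A (Python) =====
-- def summarize_response(text, max_length=600):
--     """Generate a concise summary of the response."""
--     if len(text) <= max_length:
--         return text
--
--     sentences = text.split('.')
--     summary = []
--     current_length = 0
--
--     for sentence in sentences:
--         if current_length + len(sentence) <= max_length:
--             summary.append(sentence)
--             current_length += len(sentence)
--         else:
--             break
--
--     return '.'.join(summary) + '...'
-- ===== SOURCE B (Python) =====
-- def _count_fitting(cum, max_length):
--     """Length of the prefix of cumulative sums that stays within max_length."""
--     n = 0
--     for c in cum: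
--         if c > max_length:
--             break
--         n += 1
--     return n
--
--
-- def summarize_response(text, max_length=600):
--     """Generate a concise summary of the response."""
--     if len(text) <= max_length:
--         return text
--     sentences = text.split('.')
--     lengths = [len(s) for s in sentences]
--     cum = []
--     total = 0
--     for L in lengths:
--         total += L
--         cum.append(total)
--     count = _count_fitting(cum, max_length)
--     return '.'.join(sentences[:count]) + '...'
-- ===== Notes on version B (the rewrite author's own statement) =====
-- stated objective: alternative
-- what changed: Replaces A's stateful append-and-break loop by staged passes: a list of sentence lengths, a prefix-sum list, a take-while count of fitting prefixes, then one slice and join.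
import Mathlib
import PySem

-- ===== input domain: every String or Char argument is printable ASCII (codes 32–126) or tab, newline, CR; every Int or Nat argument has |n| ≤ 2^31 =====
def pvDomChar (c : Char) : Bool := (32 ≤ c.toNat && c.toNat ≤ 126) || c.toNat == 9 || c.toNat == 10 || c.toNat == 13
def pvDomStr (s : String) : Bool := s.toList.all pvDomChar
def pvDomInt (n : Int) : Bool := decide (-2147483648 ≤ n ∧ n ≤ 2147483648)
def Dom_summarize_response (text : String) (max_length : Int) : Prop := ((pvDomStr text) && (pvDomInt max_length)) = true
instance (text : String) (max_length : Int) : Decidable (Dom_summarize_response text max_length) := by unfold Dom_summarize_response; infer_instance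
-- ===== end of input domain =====

-- B replaces A's stateful append-and-break loop by staged passes: sentence lengths,
-- a prefix-sum list, a take-while count of fitting prefixes, then one slice and join.
-- ===== PORT A =====
-- the for-loop with break: state = (summary so far, current_length)
def pvALoop (sentences : List (List Char)) (current_length : Int) (max_length : Int) :
    List (List Char) :=
  match sentences with
  | [] => []
  | s :: rest =>
    if current_length + (s.length : Int) ≤ max_length then
      s :: pvALoop rest (current_length + (s.length : Int)) max_length
    else []

def summarize_response (text : String) (max_length : Int) : String :=
  if (PySem.Chars.len text.toList : Int) ≤ max_length then text
  else
    let sentences := PySem.Chars.splitOn text.toList ['.']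
    let summary := pvALoop sentences 0 max_length
    String.mk (PySem.Chars.join ['.'] summary ++ "...".toList)

-- ===== PORT B =====
-- the running-total loop producing the prefix-sum list `cum`
def pvCum (lengths : List Int) (total : Int) : List Int :=
  match lengths with
  | [] => []
  | L :: rest => (total + L) :: pvCum rest (total + L)

-- _count_fitting: length of the prefix of cum that stays within max_length
def pvCountFit (cum : List Int) (max_length : Int) : Nat :=
  match cum with
  | [] => 0
  | c :: rest => if c > max_length then 0 else pvCountFit rest max_length + 1

def summarize_response_alt (text : String) (max_length : Int) : String :=
  if (PySem.Chars.len text.toList : Int) ≤ max_length then text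
  else
    let sentences := PySem.Chars.splitOn text.toList ['.']
    let lengths := sentences.map (fun s => (s.length : Int))
    let cum := pvCum lengths 0
    let count := pvCountFit cum max_length
    String.mk (PySem.Chars.join ['.'] (sentences.take count) ++ "...".toList)

-- ===== PRECONDITION & SPEC =====
def Spec_summarize_response (text : String) (max_length : Int) (out : String) : Prop := out = summarize_response_alt text max_length
instance (text : String) (max_length : Int) (out : String) : Decidable (Spec_summarize_response text max_length out) := by unfold Spec_summarize_response; infer_instance

-- ===== CLAIM (what is proved, stated in full; the proofs are below) =====
def Claim_equal_summarize_response : Prop := ∀ (text : String) (max_length : Int), Dom_summarize_response text max_length → Spec_summarize_response text max_length (summarize_response text max_length)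

-- ===== LEMMAS AND PROOFS =====
lemma pvALoop_eq_take (ss : List (List Char)) (cur ml : Int) :
    pvALoop ss cur ml
      = ss.take (pvCountFit (pvCum (ss.map (fun s => (s.length : Int))) cur) ml) := by
  induction ss generalizing cur with
  | nil => rfl
  | cons s rest ih =>
    simp only [pvALoop, List.map, pvCum, pvCountFit]
    by_cases h : cur + (s.length : Int) ≤ ml
    · rw [if_pos h, if_neg (by omega), ih]
      rw [List.take_succ_cons]
    · rw [if_neg h, if_pos (by omega)]
      rfl

-- ===== VERDICT (by name: the statement is the Claim_ definition above) =====
theorem summarize_response_spec : Claim_equal_summarize_response := by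
  intro text max_length _
  unfold Spec_summarize_response summarize_response summarize_response_alt
  simp only [pvALoop_eq_take]
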